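-- pv_equiv track=rewrite | github.com/piotrwinkler/radioval-data-split | split_verification/verify_full_pipeline.py | collect_per_dataset_stats
-- ===== SOURCE A (Python) =====
-- from collections import Counter, defaultdict
--
-- PATIENT_ID_KEY = "patient_id"
--
-- DATASET_KEY = "dataset"
--
-- def collect_per_dataset_stats(rows: list[dict[str, str]]) -> dict[str, tuple[int, int]]:
--     rows_by_dataset: defaultdict[str, list[dict[str, str]]] = defaultdict(list)
--     for row in rows:
--         dataset_name = row[DATASET_KEY].strip() or "UNASSIGNED"
--         rows_by_dataset[dataset_name].append(row)
--
--     stats_by_dataset: dict[str, tuple[int, int]] = {}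
--     for dataset_name in sorted(rows_by_dataset):
--         dataset_rows = rows_by_dataset[dataset_name]
--         dataset_case_count = len(
--             {
--                 row[PATIENT_ID_KEY].strip()
--                 for row in dataset_rows
--                 if row[PATIENT_ID_KEY].strip()
--             }
--         )
--         stats_by_dataset[dataset_name] = (len(dataset_rows), dataset_case_count)
--
--     return stats_by_dataset
-- ===== SOURCE B (Python) =====
-- PATIENT_ID_KEY = "patient_id"
-- DATASET_KEY = "dataset"
--
--
-- def collect_per_dataset_stats(rows: list[dict[str, str]]) -> dict[str, tuple[int, int]]:
--     # One streaming pass: per-dataset row counts and per-dataset patient-id sets,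
--     # then a single sorted sweep emitting the stats. No per-dataset row lists.
--     counts: dict[str, int] = {}
--     patients: dict[str, set[str]] = {}
--     for row in rows:
--         name = row[DATASET_KEY].strip() or "UNASSIGNED"
--         counts[name] = counts.get(name, 0) + 1
--         pid = row[PATIENT_ID_KEY].strip()
--         if pid:
--             patients.setdefault(name, set()).add(pid)
--     return {
--         name: (counts[name], len(patients.get(name, set())))
--         for name in sorted(counts)
--     }
-- ===== Notes on version B (the rewrite author's own statement) =====
-- stated objective: alternative
-- what changed: Replaces A's two-phase group-then-aggregate (materializing per-dataset row lists, then a second pass computing a set comprehension per dataset) by one streaming pass maintaining a count dict and a patient-id-set dict, followed by a single sorted sweep emitting the pairs.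
import Mathlib
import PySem

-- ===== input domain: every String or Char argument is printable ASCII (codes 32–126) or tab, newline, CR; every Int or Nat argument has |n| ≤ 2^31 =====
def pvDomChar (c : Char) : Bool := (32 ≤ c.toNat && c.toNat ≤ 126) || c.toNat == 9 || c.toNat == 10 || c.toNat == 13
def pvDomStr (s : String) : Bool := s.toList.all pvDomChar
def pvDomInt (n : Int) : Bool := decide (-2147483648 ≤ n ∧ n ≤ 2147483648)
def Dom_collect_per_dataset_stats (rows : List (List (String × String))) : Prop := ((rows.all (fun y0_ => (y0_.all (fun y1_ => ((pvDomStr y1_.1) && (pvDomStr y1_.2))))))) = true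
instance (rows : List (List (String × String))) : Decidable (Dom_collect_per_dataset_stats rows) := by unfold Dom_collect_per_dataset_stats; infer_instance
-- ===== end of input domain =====

-- B replaces A's group-then-aggregate two-phase pass by one streaming pass over the
-- rows maintaining a count dict and a patient-id-set dict (alternative decomposition).

-- Shared helpers (the same sub-expressions both Pythons compute):
-- row[DATASET_KEY].strip() or "UNASSIGNED"   (dict lookup = first match)
def pvDsName (row : List (String × String)) : String :=
  let s := PySem.Str.strip ((row.lookup "dataset").getD "")
  if s = "" then "UNASSIGNED" else s

-- row[PATIENT_ID_KEY].strip()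
def pvPidOf (row : List (String × String)) : String :=
  PySem.Str.strip ((row.lookup "patient_id").getD "")

-- ===== PORT A =====
def collect_per_dataset_stats (rows : List (List (String × String))) : List (String × Int × Int) :=
  -- rows_by_dataset = defaultdict(list); for row: rows_by_dataset[name].append(row)
  let rbd : PySem.Dict String (List (List (String × String))) :=
    rows.foldl (fun d row => d.modify (pvDsName row) [] (fun l => l ++ [row])) PySem.Dict.empty
  -- for dataset_name in sorted(rows_by_dataset): stats[name] = (len, len(set-comprehension))
  let stats : PySem.Dict String (Int × Int) :=
    (PySem.List.sorted rbd.keys id).foldl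
      (fun st name =>
        let drows := rbd.getD name []
        let caseCount :=
          (PySem.Set.ofList ((drows.filter (fun r => pvPidOf r ≠ "")).map pvPidOf)).length
        st.insert name ((drows.length : Int), (caseCount : Int)))
      PySem.Dict.empty
  stats.items

-- ===== PORT B =====
def collect_per_dataset_stats_alt (rows : List (List (String × String))) : List (String × Int × Int) :=
  -- one pass: counts[name] += 1; if pid: patients.setdefault(name, set()).add(pid)
  -- (setdefault(k, set()).add(pid) ≡ modify k ∅ (·.add pid))
  let st :=
    rows.foldl
      (fun (st : PySem.Dict String Int × PySem.Dict String (PySem.Set String)) row =>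
        (st.1.insert (pvDsName row) (st.1.getD (pvDsName row) 0 + 1),
         if pvPidOf row ≠ "" then st.2.modify (pvDsName row) PySem.Set.empty (fun s => s.add (pvPidOf row)) else st.2))
      (PySem.Dict.empty, PySem.Dict.empty)
  -- {name: (counts[name], len(patients.get(name, set()))) for name in sorted(counts)}
  (PySem.List.sorted st.1.keys id).map
    (fun name => (name, st.1.getD name 0, ((st.2.getD name PySem.Set.empty).length : Int)))

-- ===== PRECONDITION & SPEC =====
-- Pre_ excludes rows missing the "dataset" or "patient_id" key, on which Python A raises KeyError.
def Pre_collect_per_dataset_stats (rows : List (List (String × String))) : Prop :=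
  (rows.all (fun r => (r.lookup "dataset").isSome && (r.lookup "patient_id").isSome)) = true
instance (rows : List (List (String × String))) : Decidable (Pre_collect_per_dataset_stats rows) := by unfold Pre_collect_per_dataset_stats; infer_instance
def pvWitness_collect_per_dataset_stats : (List (List (String × String))) :=
  [[("dataset", " a "), ("patient_id", "p1")], [("dataset", "  "), ("patient_id", "")]]

def Spec_collect_per_dataset_stats (rows : List (List (String × String))) (out : List (String × Int × Int)) : Prop := out = collect_per_dataset_stats_alt rows
instance (rows : List (List (String × String))) (out : List (String × Int × Int)) : Decidable (Spec_collect_per_dataset_stats rows out) := by unfold Spec_collect_per_dataset_stats; infer_instance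

-- ===== CLAIM (what is proved, stated in full; the proofs are below) =====
def Claim_equal_collect_per_dataset_stats : Prop := ∀ (rows : List (List (String × String))), Dom_collect_per_dataset_stats rows → Pre_collect_per_dataset_stats rows → Spec_collect_per_dataset_stats rows (collect_per_dataset_stats rows)

-- ===== LEMMAS AND PROOFS =====

-- the conditional set-accumulating loop of B, read back per key
lemma getD_foldl_modify_add_if (l : List (String × String))
    (d : PySem.Dict String (PySem.Set String)) (c : String) :
    (l.foldl (fun d p => if p.2 ≠ "" then d.modify p.1 PySem.Set.empty (fun s => s.add p.2) else d) d).getD c PySem.Set.empty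
      = ((l.filter (fun p => p.1 == c && p.2 != "")).map (·.2)).foldl PySem.Set.add (d.getD c PySem.Set.empty) := by
  induction l generalizing d with
  | nil => rfl
  | cons p t ih =>
    rw [List.foldl_cons, List.filter_cons]
    by_cases hp : p.2 = ""
    · rw [if_neg (by simp [hp]), ih]
      simp [hp]
    · by_cases hc : p.1 = c
      · subst hc
        rw [if_pos (by simp [hp]), ih, PySem.Dict.getD_modify_self]
        simp [hp]
      · rw [if_pos (by simp [hp]), ih,
          PySem.Dict.getD_modify_of_ne d PySem.Set.empty _ (fun h => hc h.symm)]
        simp [hp, hc]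

set_option maxHeartbeats 1000000 in
theorem collect_per_dataset_stats_spec_aux (rows : List (List (String × String))) :
    collect_per_dataset_stats rows = collect_per_dataset_stats_alt rows := by
  unfold collect_per_dataset_stats collect_per_dataset_stats_alt
  dsimp only
  rw [PySem.List.foldl_prod_mk
        (fun (c : PySem.Dict String Int) row => c.insert (pvDsName row) (c.getD (pvDsName row) 0 + 1))
        (fun (p : PySem.Dict String (PySem.Set String)) row =>
          if pvPidOf row ≠ "" then p.modify (pvDsName row) PySem.Set.empty (fun s => s.add (pvPidOf row)) else p)
        rows PySem.Dict.empty PySem.Dict.empty]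
  dsimp only
  -- rewrite both grouping folds through the key function
  have hA : (rows.foldl (fun d row => d.modify (pvDsName row) [] (fun l => l ++ [row])) PySem.Dict.empty)
      = ((rows.map (fun r => (pvDsName r, r))).foldl
          (fun d p => d.modify p.1 [] (fun l => l ++ [p.2])) PySem.Dict.empty) := by
    rw [List.foldl_map]
  have hC : (rows.foldl (fun d row => d.insert (pvDsName row) (d.getD (pvDsName row) 0 + 1)) (PySem.Dict.empty (κ := String) (ν := Int)))
      = ((rows.map pvDsName).foldl (fun d x => d.insert x (d.getD x 0 + 1)) PySem.Dict.empty) := by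
    rw [List.foldl_map]
  have hP : (rows.foldl (fun d row => if pvPidOf row ≠ "" then d.modify (pvDsName row) PySem.Set.empty (fun s => s.add (pvPidOf row)) else d) PySem.Dict.empty)
      = ((rows.map (fun r => (pvDsName r, pvPidOf r))).foldl
          (fun d p => if p.2 ≠ "" then d.modify p.1 PySem.Set.empty (fun s => s.add p.2) else d) PySem.Dict.empty) := by
    rw [List.foldl_map]
  -- both key lists are the same set of dataset names
  have hkA : (rows.foldl (fun d row => d.modify (pvDsName row) [] (fun l => l ++ [row])) PySem.Dict.empty).keys
      = PySem.Set.update (PySem.Dict.empty (κ := String) (ν := List (List (String × String)))).keys (rows.map pvDsName) :=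
    PySem.Dict.keys_foldl_modify_key rows pvDsName [] (fun _ row l => l ++ [row]) _
  have hkC : (rows.foldl (fun d row => d.insert (pvDsName row) (d.getD (pvDsName row) 0 + 1)) (PySem.Dict.empty (κ := String) (ν := Int))).keys
      = PySem.Set.update (PySem.Dict.empty (κ := String) (ν := Int)).keys (rows.map pvDsName) :=
    PySem.Dict.keys_foldl_insert_key rows pvDsName (fun d row => d.getD (pvDsName row) 0 + 1) _
  -- the sorted key list, shared by both sides
  have hnodup : (PySem.List.sorted (PySem.Set.update (PySem.Dict.empty (κ := String) (ν := List (List (String × String)))).keys (rows.map pvDsName)) id).Nodup := by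
    have h1 : (PySem.Set.update (PySem.Dict.empty (κ := String) (ν := List (List (String × String)))).keys (rows.map pvDsName)).Nodup := by
      rw [← hkA]
      exact PySem.Dict.nodup_keys_foldl_modify_key rows pvDsName [] _ _ (by simp [PySem.Dict.empty, PySem.Dict.keys])
    exact ((PySem.List.sorted_perm _ id false).nodup_iff).2 h1
  rw [hkA, hkC]
  -- the A-side second loop inserts along distinct fresh keys: its items are a map
  rw [PySem.Dict.items_foldl_insert_fresh
        (PySem.List.sorted (PySem.Set.update (PySem.Dict.empty (κ := String) (ν := List (List (String × String)))).keys (rows.map pvDsName)) id)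
        (fun n => n)
        (fun name =>
          (((((rows.foldl (fun d row => d.modify (pvDsName row) [] (fun l => l ++ [row])) (PySem.Dict.empty (κ := String) (ν := List (List (String × String))))).getD name []).length : Int)),
           (((PySem.Set.ofList ((((rows.foldl (fun d row => d.modify (pvDsName row) [] (fun l => l ++ [row])) PySem.Dict.empty).getD name []).filter (fun r => pvPidOf r ≠ "")).map pvPidOf)).length : Int))))
        PySem.Dict.empty
        (fun a _ => by simp [PySem.Dict.empty, PySem.Dict.contains]) (by simpa using hnodup)]
  simp only [show (PySem.Dict.empty (κ := String) (ν := Int × Int)).items = [] from rfl, List.nil_append]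
  -- pointwise equality of the two emitted tuples
  apply List.map_congr_left
  intro c _
  dsimp only
  refine Prod.ext rfl (Prod.ext ?_ ?_)
  · -- row count: length of the grouped list = counter value
    have := PySem.Dict.getD_foldl_modify_append (rows.map (fun r => (pvDsName r, r))) (PySem.Dict.empty) c
    rw [hA, this, hC, PySem.Dict.getD_foldl_insert_add_one]
    simp only [PySem.Dict.getD, PySem.Dict.empty]
    simp [List.filter_map, List.count_eq_countP, Function.comp_def, List.countP_eq_length_filter, eq_comm]
    rfl
  · -- distinct patient count: set comprehension over the group = conditional set fold
    show _ = _
    dsimp only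
    have := PySem.Dict.getD_foldl_modify_append (rows.map (fun r => (pvDsName r, r))) (PySem.Dict.empty) c
    rw [hA, this, hP, getD_foldl_modify_add_if,
        show (PySem.Dict.empty (κ := String) (ν := List (List (String × String)))).getD c [] = [] from rfl,
        show (PySem.Dict.empty (κ := String) (ν := PySem.Set String)).getD c PySem.Set.empty = PySem.Set.empty from rfl,
        List.nil_append]
    congr 2
    have hset : ∀ L : List String, List.foldl PySem.Set.add PySem.Set.empty L = PySem.Set.ofList L := fun _ => rfl
    rw [hset]
    congr 1
    simp only [List.filter_map, List.map_map, List.filter_filter, Function.comp_def, List.map_id']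
    congr 1
    apply List.filter_congr
    intro r _
    by_cases h : PySem.Str.strip ((List.lookup "patient_id" r).getD "") = "" <;>
      simp [pvPidOf, h, Bool.and_comm]

-- ===== VERDICT (by name: the statement is the Claim_ definition above) =====
theorem collect_per_dataset_stats_spec : Claim_equal_collect_per_dataset_stats := by
  intro rows _ _
  exact collect_per_dataset_stats_spec_aux rows
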